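-- pv_equiv track=rewrite | github.com/yzzhn/features | generate_features/features/zeek_logs/udfs.py | ssl_issuer
-- ===== SOURCE A (Python) =====
-- def ssl_issuer(s):
--     default = ["", "", ""]
--     if s:
--         for internalstring in s.split(","):
--             lhsrhs = internalstring.split("=")
--             if len(lhsrhs) == 2:
--                 if lhsrhs[0] == "CN":
--                     default[0] = lhsrhs[1]
--                 if lhsrhs[0] == "O":
--                     default[1] = lhsrhs[1]
--                 if lhsrhs[0] == "C":
--                     default[2] = lhsrhs[1]
--     return default
-- ===== SOURCE B (Python) =====
-- def ssl_issuer(s):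
--     toks = s.split(",") if s else []
--
--     def last_value(key):
--         # first valid match scanning from the back == last writer in A's forward pass
--         for tok in reversed(toks):
--             p = tok.split("=")
--             if len(p) == 2 and p[0] == key:
--                 return p[1]
--         return ""
--
--     return [last_value(k) for k in ("CN", "O", "C")]
-- ===== Notes on version B (the rewrite author's own statement) =====
-- stated objective: alternative
-- what changed: Replaces A's single forward pass mutating a 3-slot list via per-key branches by three independent find-first searches over the reversed token list (first match from the back = last writer), with no shared accumulator.
import Mathlib
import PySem

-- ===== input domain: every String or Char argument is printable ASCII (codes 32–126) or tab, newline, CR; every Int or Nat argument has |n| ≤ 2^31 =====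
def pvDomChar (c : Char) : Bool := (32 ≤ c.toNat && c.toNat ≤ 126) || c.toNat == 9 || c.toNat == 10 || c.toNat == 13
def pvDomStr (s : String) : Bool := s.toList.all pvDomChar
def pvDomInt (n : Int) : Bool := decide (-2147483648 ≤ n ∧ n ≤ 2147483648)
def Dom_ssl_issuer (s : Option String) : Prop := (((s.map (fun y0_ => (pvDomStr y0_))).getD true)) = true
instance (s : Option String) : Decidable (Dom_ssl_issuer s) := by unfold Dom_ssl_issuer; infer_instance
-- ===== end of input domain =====

-- B replaces A's single forward pass mutating a 3-slot list by three independent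
-- find-first searches over the reversed token list (first match from the back = last writer).

-- ===== PORT A =====
-- s.split(sep) with a literal nonempty sep: PySem.Str.split? never returns none here
def pySplit (s sep : String) : List String := (PySem.Str.split? s sep).getD []
-- one loop-body step of A: conditional index assignments into the 3-list
def sslStepA (acc : List String) (tok : String) : List String :=
  let lhsrhs := pySplit tok "="
  if lhsrhs.length = 2 then
    let acc := if PySem.List.pyGetD lhsrhs 0 "" == "CN" then PySem.List.pySetD acc 0 (PySem.List.pyGetD lhsrhs 1 "") else acc
    let acc := if PySem.List.pyGetD lhsrhs 0 "" == "O" then PySem.List.pySetD acc 1 (PySem.List.pyGetD lhsrhs 1 "") else acc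
    if PySem.List.pyGetD lhsrhs 0 "" == "C" then PySem.List.pySetD acc 2 (PySem.List.pyGetD lhsrhs 1 "") else acc
  else acc

def ssl_issuer (s : Option String) : List String :=
  match s with
  | none => ["", "", ""]
  | some str =>
    if str == "" then ["", "", ""]
    else (pySplit str ",").foldl sslStepA ["", "", ""]

-- ===== PORT B =====
-- B's inner loop `for tok in reversed(toks): …` as structural recursion on the reversed list
def sslLastValue (toks : List String) (key : String) : String :=
  match toks with
  | [] => ""
  | t :: ts =>
    let p := pySplit t "="
    if p.length = 2 && PySem.List.pyGetD p 0 "" == key then PySem.List.pyGetD p 1 ""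
    else sslLastValue ts key

def ssl_issuer_alt (s : Option String) : List String :=
  let toks : List String :=
    match s with
    | none => []
    | some str => if str == "" then [] else pySplit str ","
  ["CN", "O", "C"].map (fun k => sslLastValue toks.reverse k)

-- ===== PRECONDITION & SPEC =====
def Spec_ssl_issuer (s : Option String) (out : List String) : Prop := out = ssl_issuer_alt s
instance (s : Option String) (out : List String) : Decidable (Spec_ssl_issuer s out) := by unfold Spec_ssl_issuer; infer_instance

-- ===== CLAIM (what is proved, stated in full; the proofs are below) =====
def Claim_equal_ssl_issuer : Prop := ∀ (s : Option String), Dom_ssl_issuer s → Spec_ssl_issuer s (ssl_issuer s)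

-- ===== LEMMAS AND PROOFS =====
-- the value a single token contributes for a given key, if any
def sslPairVal (tok key : String) : Option String :=
  match pySplit tok "=" with
  | [k, v] => if k == key then some v else none
  | _ => none

-- first match in the list, as an Option (distinguishes "no match" from "matched empty value")
def sslFind? (toks : List String) (key : String) : Option String :=
  match toks with
  | [] => none
  | t :: ts => (sslPairVal t key).or (sslFind? ts key)

lemma sslLastValue_eq_find (ts : List String) (k : String) :
    sslLastValue ts k = (sslFind? ts k).getD "" := by
  induction ts with
  | nil => rfl
  | cons t ts ih =>
    simp only [sslLastValue, sslFind?, sslPairVal]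
    rcases h : pySplit t "=" with _ | ⟨x, _ | ⟨y, _ | ⟨z, r⟩⟩⟩ <;>
      simp only [List.length_nil, List.length_cons] <;>
      first
      | (by_cases hk : x == k <;>
          simp [hk, ih, Option.or, PySem.List.pyGetD, PySem.List.pyGet?, PySem.List.pyIdx?])
      | simp [ih, Option.or]

lemma sslFind?_append_singleton (xs : List String) (t k : String) :
    sslFind? (xs ++ [t]) k = (sslFind? xs k).or (sslPairVal t k) := by
  induction xs with
  | nil => simp only [List.nil_append, sslFind?]; cases sslPairVal t k <;> rfl
  | cons x xs ih =>
    simp only [List.cons_append, sslFind?, ih]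
    cases sslPairVal x k <;> simp [Option.or]

lemma sslStepA_eq (a b c : String) (t : String) :
    sslStepA [a, b, c] t =
      [(sslPairVal t "CN").getD a, (sslPairVal t "O").getD b, (sslPairVal t "C").getD c] := by
  unfold sslStepA sslPairVal
  rcases h : pySplit t "=" with _ | ⟨k, _ | ⟨v, _ | ⟨w, r⟩⟩⟩ <;>
    simp [PySem.List.pyGetD, PySem.List.pyGet?, PySem.List.pyIdx?, PySem.List.pySetD,
      PySem.List.pySet?]
  by_cases h1 : k == "CN" <;> by_cases h2 : k == "O" <;> by_cases h3 : k == "C" <;>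
    simp_all

lemma sslLoop_eq (ts : List String) (a b c : String) :
    ts.foldl sslStepA [a, b, c] =
      [(sslFind? ts.reverse "CN").getD a, (sslFind? ts.reverse "O").getD b,
       (sslFind? ts.reverse "C").getD c] := by
  induction ts generalizing a b c with
  | nil => simp [sslFind?]
  | cons t ts ih =>
    simp only [List.foldl_cons, sslStepA_eq, ih, List.reverse_cons, sslFind?_append_singleton]
    congr 1 <;> [skip; congr 1] <;> cases sslFind? ts.reverse "CN" <;>
      cases sslFind? ts.reverse "O" <;> cases sslFind? ts.reverse "C" <;> simp [Option.or]

-- ===== VERDICT (by name: the statement is the Claim_ definition above) =====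
theorem ssl_issuer_spec : Claim_equal_ssl_issuer := by
  intro s _
  unfold Spec_ssl_issuer ssl_issuer ssl_issuer_alt
  match s with
  | none => rfl
  | some str =>
    by_cases h : str == "" <;> simp only [h, if_true, if_false, Bool.false_eq_true]
    · rfl
    · simp [sslLoop_eq, List.map, sslLastValue_eq_find]
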